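-- pv_equiv track=rewrite | github.com/gskuratowicz/prg-basics | test/complete programs/p1.py | f
-- ===== SOURCE A (Python) =====
-- def f(d):
--     count = 0
--     for char in d:
--         if char == "+":
--             count += 1
--         elif char == "-":
--             count -= 1
--     return count
-- ===== SOURCE B (Python) =====
-- def f(d):
--     # Stack-based cancellation: opposite adjacent signs annihilate, like
--     # bracket matching.  The invariant that the stack only ever holds one
--     # kind of sign makes the signed stack height equal the net count.
--     stack = []
--     for ch in d:
--         if ch == "+":
--             if stack and stack[-1] == "-":
--                 stack.pop()
--             else:
--                 stack.append("+")
--         elif ch == "-":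
--             if stack and stack[-1] == "+":
--                 stack.pop()
--             else:
--                 stack.append("-")
--     if not stack:
--         return 0
--     return len(stack) if stack[-1] == "+" else -len(stack)
-- ===== Notes on version B (the rewrite author's own statement) =====
-- stated objective: alternative
-- what changed: Replaces the signed running counter with a cancellation stack (bracket-matching style): a '+' pops a pending '-' or is pushed, and vice versa; the answer is read off at the end as the signed stack height, correct because the stack is always sign-homogeneous.
import Mathlib
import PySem

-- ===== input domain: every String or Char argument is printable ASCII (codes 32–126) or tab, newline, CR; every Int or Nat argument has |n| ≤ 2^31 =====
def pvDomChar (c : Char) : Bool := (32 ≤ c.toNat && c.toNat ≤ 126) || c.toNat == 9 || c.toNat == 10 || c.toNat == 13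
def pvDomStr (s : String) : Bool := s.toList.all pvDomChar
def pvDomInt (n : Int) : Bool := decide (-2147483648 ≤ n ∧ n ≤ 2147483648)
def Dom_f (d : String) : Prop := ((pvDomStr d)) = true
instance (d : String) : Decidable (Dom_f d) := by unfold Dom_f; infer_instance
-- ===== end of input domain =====

-- B replaces A's signed running counter by a cancellation stack (bracket-matching
-- style); same O(n) cost, a genuinely different mechanism. Objective: alternative.

-- ===== PORT A =====
def f (d : String) : Int :=
  d.toList.foldl
    (fun count char =>
      if char = '+' then count + 1
      else if char = '-' then count - 1
      else count) 0

-- ===== PORT B =====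
-- one step of Source B's loop body ('stack[-1]' = getLast?, 'pop' = dropLast, 'append' = ++ [·])
def pvBStep (st : List Char) (ch : Char) : List Char :=
  if ch = '+' then
    if st ≠ [] ∧ st.getLast? = some '-' then st.dropLast else st ++ ['+']
  else if ch = '-' then
    if st ≠ [] ∧ st.getLast? = some '+' then st.dropLast else st ++ ['-']
  else st

def f_alt (d : String) : Int :=
  let stack := d.toList.foldl pvBStep []
  if stack = [] then 0
  else if stack.getLast? = some '+' then (stack.length : Int)
  else -(stack.length : Int)

-- ===== PRECONDITION & SPEC =====
def Spec_f (d : String) (out : Int) : Prop := out = f_alt d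
instance (d : String) (out : Int) : Decidable (Spec_f d out) := by unfold Spec_f; infer_instance

-- ===== CLAIM (what is proved, stated in full; the proofs are below) =====
def Claim_equal_f : Prop := ∀ (d : String), Dom_f d → Spec_f d (f d)

-- ===== LEMMAS AND PROOFS =====

-- the stack B maintains, as a function of A's counter: |v| copies of v's sign
def pvEnc (v : Int) : List Char :=
  if 0 ≤ v then List.replicate v.toNat '+' else List.replicate (-v).toNat '-'

theorem pvReplLast (n : Nat) (c : Char) (h : n ≠ 0) :
    (List.replicate n c).getLast? = some c := by
  rw [List.getLast?_replicate]
  simp [h]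

theorem pvReplDrop (n : Nat) (c : Char) :
    (List.replicate (n + 1) c).dropLast = List.replicate n c := by
  rw [List.replicate_succ', List.dropLast_concat]

theorem pvReplApp (n : Nat) (c : Char) :
    List.replicate n c ++ [c] = List.replicate (n + 1) c :=
  (List.replicate_succ' ..).symm

theorem pvBStep_enc (v : Int) (c : Char) :
    pvBStep (pvEnc v) c
      = pvEnc (if c = '+' then v + 1 else if c = '-' then v - 1 else v) := by
  unfold pvBStep pvEnc
  by_cases hp : c = '+'
  · subst hp
    rw [if_pos rfl, if_pos rfl]
    by_cases hv : 0 ≤ v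
    · rw [if_pos hv, if_pos (show (0:Int) ≤ v + 1 by omega)]
      have hcond : ¬(List.replicate v.toNat '+' ≠ [] ∧
          (List.replicate v.toNat '+').getLast? = some '-') := by
        rintro ⟨hne, hl⟩
        rcases Nat.eq_zero_or_pos v.toNat with h0 | h0
        · exact hne (by simp [h0])
        · rw [pvReplLast _ _ (by omega)] at hl
          simp at hl
      rw [if_neg hcond, pvReplApp]
      congr 1
      omega
    · rw [if_neg hv]
      obtain ⟨m, hm⟩ : ∃ m, (-v).toNat = m + 1 := ⟨(-v).toNat - 1, by omega⟩
      have hcond : (List.replicate (-v).toNat '-' ≠ [] ∧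
          (List.replicate (-v).toNat '-').getLast? = some '-') :=
        ⟨by simp [hm], pvReplLast _ _ (by omega)⟩
      rw [if_pos hcond, hm, pvReplDrop]
      by_cases h1 : 0 ≤ v + 1
      · rw [if_pos h1]
        have hm0 : m = 0 := by omega
        have ht : (v + 1).toNat = 0 := by omega
        simp [hm0, ht]
      · rw [if_neg h1]
        congr 1
        omega
  · by_cases hm : c = '-'
    · subst hm
      rw [if_neg hp, if_pos rfl, if_neg hp, if_pos rfl]
      by_cases hv : 0 ≤ v
      · rw [if_pos hv]
        by_cases h1 : v = 0
        · subst h1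
          rw [if_neg (by rintro ⟨hne, _⟩; exact hne (by simp))]
          rw [if_neg (show ¬(0:Int) ≤ 0 - 1 by omega)]
          norm_num
        · obtain ⟨m, hmm⟩ : ∃ m, v.toNat = m + 1 := ⟨v.toNat - 1, by omega⟩
          have hcond : (List.replicate v.toNat '+' ≠ [] ∧
              (List.replicate v.toNat '+').getLast? = some '+') :=
            ⟨by simp [hmm], pvReplLast _ _ (by omega)⟩
          rw [if_pos hcond, hmm, pvReplDrop,
              if_pos (show (0:Int) ≤ v - 1 by omega)]
          congr 1
          omega
      · rw [if_neg hv]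
        have hcond : ¬(List.replicate (-v).toNat '-' ≠ [] ∧
            (List.replicate (-v).toNat '-').getLast? = some '+') := by
          rintro ⟨hne, hl⟩
          rw [pvReplLast _ _ (by omega)] at hl
          simp at hl
        rw [if_neg hcond, pvReplApp, if_neg (show ¬(0:Int) ≤ v - 1 by omega)]
        congr 1
        omega
    · rw [if_neg hp, if_neg hm, if_neg hp, if_neg hm]

theorem pvFoldl_enc (cs : List Char) (v : Int) :
    cs.foldl pvBStep (pvEnc v)
      = pvEnc (cs.foldl
          (fun count char =>
            if char = '+' then count + 1
            else if char = '-' then count - 1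
            else count) v) := by
  induction cs generalizing v with
  | nil => rfl
  | cons c cs ih => simp only [List.foldl_cons, pvBStep_enc, ih]

theorem pvFoldl_enc0 (cs : List Char) :
    cs.foldl pvBStep []
      = pvEnc (cs.foldl
          (fun count char =>
            if char = '+' then count + 1
            else if char = '-' then count - 1
            else count) 0) := by
  have h := pvFoldl_enc cs 0
  have h0 : pvEnc 0 = [] := by simp [pvEnc]
  rw [h0] at h
  exact h

theorem pvDecode_enc (v : Int) :
    (if pvEnc v = [] then (0 : Int)
     else if (pvEnc v).getLast? = some '+' then ((pvEnc v).length : Int)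
     else -((pvEnc v).length : Int)) = v := by
  unfold pvEnc
  by_cases hv : 0 ≤ v
  · rw [if_pos hv]
    by_cases h0 : v = 0
    · subst h0
      simp
    · rw [if_neg (by simp; omega), if_pos (pvReplLast _ _ (by omega))]
      simp
      omega
  · rw [if_neg hv]
    rw [if_neg (by simp; omega), if_neg (by rw [pvReplLast _ _ (by omega)]; simp)]
    simp
    omega

-- ===== VERDICT (by name: the statement is the Claim_ definition above) =====
theorem f_spec : Claim_equal_f := by
  intro d _
  unfold Spec_f f f_alt
  simp only [pvFoldl_enc0]
  exact (pvDecode_enc _).symm
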